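-- pv_equiv track=rewrite | github.com/ozoin/ML_Pattern_Classification | DatasetTools.py | non_zero_sequences
-- ===== SOURCE A (Python) =====
-- def non_zero_sequences(lst):
--     result = []
--     sequence = []
--     for num in lst:
--         if num != 0:
--             sequence.append(num)
--         elif sequence:
--             result.append(sequence)
--             sequence = []
--     if sequence:
--         result.append(sequence)
--     return result
-- ===== SOURCE B (Python) =====
-- from itertools import groupby
--
-- def non_zero_sequences(lst):
--     return [list(g) for k, g in groupby(lst, key=lambda x: x != 0) if k]
-- ===== Notes on version B (the rewrite author's own statement) =====
-- stated objective: idiomatic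
-- what changed: Replaced the manual accumulator/flush loop by itertools.groupby on the predicate x != 0, keeping only the non-zero runs; no trailing-flush special case remains.
import Mathlib
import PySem

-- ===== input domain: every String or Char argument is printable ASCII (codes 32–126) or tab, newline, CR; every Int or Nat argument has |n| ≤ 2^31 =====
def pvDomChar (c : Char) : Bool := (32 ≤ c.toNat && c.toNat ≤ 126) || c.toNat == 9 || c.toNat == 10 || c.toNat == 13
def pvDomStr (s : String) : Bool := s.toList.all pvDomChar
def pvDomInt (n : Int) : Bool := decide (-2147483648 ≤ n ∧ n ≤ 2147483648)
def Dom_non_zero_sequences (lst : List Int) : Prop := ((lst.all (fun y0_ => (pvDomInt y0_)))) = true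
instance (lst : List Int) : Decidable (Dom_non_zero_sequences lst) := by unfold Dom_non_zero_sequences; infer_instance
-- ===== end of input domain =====

-- B replaces A's manual accumulator/flush loop by predicate-based grouping (groupby on x != 0),
-- keeping exactly the non-zero runs; objective: idiomatic.


-- ===== PORT A =====
-- one step of A's for-loop body over the state (result, sequence)
def nzsStep (st : List (List Int) × List Int) (num : Int) : List (List Int) × List Int :=
  if num ≠ 0 then (st.1, st.2 ++ [num])
  else if st.2 ≠ [] then (st.1 ++ [st.2], [])
  else st

def non_zero_sequences (lst : List Int) : List (List Int) :=
  let st := lst.foldl nzsStep ([], [])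
  if st.2 ≠ [] then st.1 ++ [st.2] else st.1

-- ===== PORT B =====
-- groupby(lst, key=λx, x ≠ 0): peel one maximal run at a time, keep it iff its key is true
def non_zero_sequences_alt : List Int → List (List Int)
  | [] => []
  | x :: xs =>
    if x = 0 then
      -- run of key=False (zeros): dropped by the filter
      non_zero_sequences_alt (xs.dropWhile (fun y => y = 0))
    else
      -- run of key=True (non-zeros): materialised and kept
      (x :: xs.takeWhile (fun y => y ≠ 0)) :: non_zero_sequences_alt (xs.dropWhile (fun y => y ≠ 0))
termination_by l => l.length
decreasing_by
  · exact Nat.lt_succ_of_le (xs.length_dropWhile_le _)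
  · exact Nat.lt_succ_of_le (xs.length_dropWhile_le _)

-- ===== PRECONDITION & SPEC =====
def Spec_non_zero_sequences (lst : List Int) (out : List (List Int)) : Prop := out = non_zero_sequences_alt lst
instance (lst : List Int) (out : List (List Int)) : Decidable (Spec_non_zero_sequences lst out) := by unfold Spec_non_zero_sequences; infer_instance

-- ===== CLAIM (what is proved, stated in full; the proofs are below) =====
def Claim_equal_non_zero_sequences : Prop := ∀ (lst : List Int), Dom_non_zero_sequences lst → Spec_non_zero_sequences lst (non_zero_sequences lst)

-- ===== LEMMAS AND PROOFS =====

theorem alt_nil : non_zero_sequences_alt [] = [] := by rw [non_zero_sequences_alt]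

theorem nzsStep_nonzero (st : List (List Int) × List Int) (x : Int) (hx : x ≠ 0) :
    nzsStep st x = (st.1, st.2 ++ [x]) := by simp [nzsStep, hx]

theorem nzsStep_zero_flush (st : List (List Int) × List Int) (hs : st.2 ≠ []) :
    nzsStep st 0 = (st.1 ++ [st.2], []) := by simp [nzsStep, hs]

theorem nzsStep_zero_empty (res : List (List Int)) :
    nzsStep (res, []) 0 = (res, []) := by simp [nzsStep]

-- leading zeros do not change B's result
theorem alt_dropWhile_zero (l : List Int) :
    non_zero_sequences_alt (l.dropWhile (fun y => y = 0)) = non_zero_sequences_alt l := by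
  cases l with
  | nil => simp [List.dropWhile]
  | cons x xs =>
    by_cases hx : x = 0
    · subst hx
      simp only [List.dropWhile, decide_true]
      conv_rhs => rw [non_zero_sequences_alt]
      simp
    · simp [List.dropWhile, hx]

-- A's flushed final state (pending run seq prepended) equals B's grouping
def nzsCombine (seq l : List Int) : List (List Int) :=
  if seq = [] then non_zero_sequences_alt l
  else (seq ++ l.takeWhile (fun y => y ≠ 0)) :: non_zero_sequences_alt (l.dropWhile (fun y => y ≠ 0))

theorem nzs_loop (l : List Int) : ∀ (res : List (List Int)) (seq : List Int),
    (let st := l.foldl nzsStep (res, seq)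
     if st.2 ≠ [] then st.1 ++ [st.2] else st.1) = res ++ nzsCombine seq l := by
  induction l with
  | nil =>
    intro res seq
    by_cases h : seq = [] <;> simp [nzsCombine, h, List.foldl, alt_nil]
  | cons x xs ih =>
    intro res seq
    by_cases hx : x = 0
    · subst hx
      by_cases hs : seq = []
      · subst hs
        simp only [List.foldl, nzsStep_zero_empty]
        rw [ih res []]
        simp only [nzsCombine]  -- seq = []
        conv_rhs => rw [non_zero_sequences_alt]
        simp [← alt_dropWhile_zero xs]
      · simp only [List.foldl, nzsStep_zero_flush (res, seq) hs]
        rw [ih (res ++ [seq]) []]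
        simp only [nzsCombine, if_neg hs]
        have h2 : non_zero_sequences_alt xs = non_zero_sequences_alt ((0 : Int) :: xs) := by
          conv_rhs => rw [non_zero_sequences_alt]
          simp [← alt_dropWhile_zero xs]
        simp [h2, List.takeWhile, List.dropWhile]
    · simp only [List.foldl, nzsStep_nonzero (res, seq) x hx]
      rw [ih res (seq ++ [x])]
      by_cases hs : seq = []
      · subst hs
        simp only [nzsCombine]
        conv_rhs => rw [non_zero_sequences_alt]
        simp [hx]
      · simp [nzsCombine, hs, hx, List.takeWhile, List.dropWhile]

-- ===== VERDICT (by name: the statement is the Claim_ definition above) =====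
theorem non_zero_sequences_spec : Claim_equal_non_zero_sequences := by
  intro lst _
  show non_zero_sequences lst = non_zero_sequences_alt lst
  have := nzs_loop lst [] []
  simpa [non_zero_sequences, nzsCombine] using this
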